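-- pv_equiv track=rewrite | github.com/Kayla-Ard/HW_BES_Week1_Day4 | whiteboard/whiteboard.py | solution
-- ===== SOURCE A (Python) =====
-- def solution(s):
--     color_count = {}
--     for color in (s):
--         if color in color_count:
--             color_count[color] += 1
--         else:
--             color_count[color] = 1
--     pairs = 0
--     for color in color_count:
--             pairs += color_count[color] //2
--     return pairs
-- ===== SOURCE B (Python) =====
-- def solution(s):
--     unpaired = set()
--     pairs = 0
--     for color in s:
--         if color in unpaired:
--             unpaired.remove(color)
--             pairs += 1
--         else:
--             unpaired.add(color)
--     return pairs
-- ===== Notes on version B (the rewrite author's own statement) =====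
-- stated objective: simpler
-- what changed: Single pass toggling a set of currently-unpaired colors (match completed -> remove and count) instead of building a full frequency dict and then summing count//2 over it in a second loop.
import Mathlib
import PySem

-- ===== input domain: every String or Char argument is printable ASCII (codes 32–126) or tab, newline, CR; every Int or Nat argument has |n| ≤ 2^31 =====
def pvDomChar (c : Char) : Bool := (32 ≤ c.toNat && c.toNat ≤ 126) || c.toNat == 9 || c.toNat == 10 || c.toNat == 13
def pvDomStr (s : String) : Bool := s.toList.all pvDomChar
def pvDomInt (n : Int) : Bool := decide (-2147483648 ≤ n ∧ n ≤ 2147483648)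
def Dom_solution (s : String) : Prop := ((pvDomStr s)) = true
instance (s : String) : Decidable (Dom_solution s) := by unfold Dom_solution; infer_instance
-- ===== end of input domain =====

-- B replaces A's count-then-sum (frequency dict, then Σ count//2) by one pass toggling a set of unpaired colors; same cost, simpler.

-- ===== PORT A =====
def solution (s : String) : Int :=
  let colorCount : PySem.Dict Char Int :=
    s.toList.foldl (fun d color =>
      if d.contains color then d.insert color (d.getD color 0 + 1)
      else d.insert color 1) PySem.Dict.empty
  colorCount.keys.foldl (fun pairs color => pairs + PySem.Int.floordiv (colorCount.getD color 0) 2) 0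

-- ===== PORT B =====
-- set.remove is ported as Set.discard: under the membership guard they agree exactly (no KeyError possible).
def solution_alt (s : String) : Int :=
  (s.toList.foldl (fun (st : PySem.Set Char × Int) color =>
      if PySem.Set.contains st.1 color then (PySem.Set.discard st.1 color, st.2 + 1)
      else (PySem.Set.add st.1 color, st.2)) (PySem.Set.empty, 0)).2

-- ===== PRECONDITION & SPEC =====
def Spec_solution (s : String) (out : Int) : Prop := out = solution_alt s
instance (s : String) (out : Int) : Decidable (Spec_solution s out) := by unfold Spec_solution; infer_instance

-- ===== CLAIM (what is proved, stated in full; the proofs are below) =====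
def Claim_equal_solution : Prop := ∀ (s : String), Dom_solution s → Spec_solution s (solution s)

-- ===== LEMMAS AND PROOFS =====

-- pair count of t given a predicate P marking colors with one pending (unpaired) occurrence before t
def pvH (P : Char → Bool) (t : List Char) : Nat :=
  ∑ k ∈ t.toFinset, (t.count k + (if P k then 1 else 0)) / 2

lemma pv_sum_insert_split (s : Finset Char) (c : Char) (f g : Char → Nat)
    (hfg : ∀ k, k ≠ c → f k = g k) (hg0 : c ∉ s → g c = 0) :
    (∑ k ∈ insert c s, f k) + g c = f c + ∑ k ∈ s, g k := by
  by_cases hc : c ∈ s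
  · rw [Finset.insert_eq_self.mpr hc, ← Finset.add_sum_erase s f hc, ← Finset.add_sum_erase s g hc]
    have : ∑ k ∈ s.erase c, f k = ∑ k ∈ s.erase c, g k :=
      Finset.sum_congr rfl (fun k hk => hfg k (Finset.mem_erase.mp hk).1)
    omega
  · rw [Finset.sum_insert hc, hg0 hc]
    have : ∑ k ∈ s, f k = ∑ k ∈ s, g k :=
      Finset.sum_congr rfl (fun k hk => hfg k (fun h => hc (h ▸ hk)))
    omega

lemma pvH_cons (t : List Char) (c : Char) (P P' : Char → Bool)
    (h' : ∀ k, P' k = if k = c then !(P c) else P k) :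
    pvH P (c :: t) = (if P c then 1 else 0) + pvH P' t := by
  unfold pvH
  rw [List.toFinset_cons]
  have key := pv_sum_insert_split t.toFinset c
      (fun k => ((c :: t).count k + (if P k then 1 else 0)) / 2)
      (fun k => (t.count k + (if P' k then 1 else 0)) / 2)
      (fun k hk => by
        simp [h' k, hk, Ne.symm hk])
      (fun hc => by
        have h0 : t.count c = 0 := by
          rw [List.count_eq_zero]; exact fun h => hc (List.mem_toFinset.mpr h)
        simp only [h0, h' c]
        cases hP : P c <;> simp)
  have hcc : (c :: t).count c = t.count c + 1 := by simp
  have hPc' : P' c = !(P c) := by rw [h' c, if_pos rfl]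
  simp only [hcc, hPc'] at key
  cases hP : P c <;> simp [hP] at key ⊢ <;> omega

-- B's fold computes p plus the pair count relative to the current unpaired set
lemma pv_fold_eq_pvH (t : List Char) (st : PySem.Set Char) (p : Int) :
    (t.foldl (fun (st : PySem.Set Char × Int) color =>
      if PySem.Set.contains st.1 color then (PySem.Set.discard st.1 color, st.2 + 1)
      else (PySem.Set.add st.1 color, st.2)) (st, p)).2
    = p + (pvH (fun k => PySem.Set.contains st k) t : Int) := by
  induction t generalizing st p with
  | nil => simp [pvH]
  | cons c t ih =>
    simp only [List.foldl_cons]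
    by_cases hc : c ∈ st
    · rw [if_pos (by simpa using hc)]
      rw [ih]
      rw [pvH_cons t c _ (fun k => PySem.Set.contains (PySem.Set.discard st c) k)
        (fun k => by
          by_cases hkc : k = c
          · subst hkc
            simp [PySem.Set.mem_discard, hc]
          · simp [PySem.Set.mem_discard, hkc])]
      simp [hc]
      ring
    · rw [if_neg (by simpa using hc)]
      rw [ih]
      rw [pvH_cons t c _ (fun k => PySem.Set.contains (PySem.Set.add st c) k)
        (fun k => by
          by_cases hkc : k = c
          · subst hkc
            simp [PySem.Set.mem_add, hc]
          · simp [PySem.Set.mem_add, hkc])]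
      simp [hc]

-- A's value: sum of count//2 over the distinct colors
lemma pv_solution_eq (s : String) :
    solution s = ((PySem.Set.ofList s.toList).map
      (fun k => ((s.toList.count k / 2 : Nat) : Int))).sum := by
  simp only [solution]
  have hstep : ∀ (d : PySem.Dict Char Int) (c : Char),
      (if d.contains c then d.insert c (d.getD c 0 + 1) else d.insert c 1)
      = d.insert c (d.getD c 0 + 1) := by
    intro d c
    by_cases h : d.contains c = true
    · rw [if_pos h]
    · rw [if_neg h]
      have h0 : d.getD c (0 : Int) = 0 := by
        apply PySem.Dict.getD_of_not_contains
        simpa using h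
      rw [h0]
      norm_num
  have hc1 : s.toList.foldl (fun (d : PySem.Dict Char Int) color =>
      if d.contains color then d.insert color (d.getD color 0 + 1) else d.insert color 1) PySem.Dict.empty
      = s.toList.foldl (fun (d : PySem.Dict Char Int) x => d.insert x (d.getD x 0 + 1)) PySem.Dict.empty :=
    PySem.List.foldl_congr_mem _ _ _ _ (fun d c _ => hstep d c)
  rw [hc1]
  rw [PySem.Dict.keys_foldl_insert]
  rw [PySem.List.foldl_add (g := fun k =>
    PySem.Int.floordiv ((s.toList.foldl (fun d x => d.insert x (d.getD x 0 + 1)) PySem.Dict.empty).getD k 0) 2)]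
  rw [zero_add]
  have hkeys : PySem.Set.update ((PySem.Dict.empty : PySem.Dict Char Int)).keys s.toList
      = PySem.Set.ofList s.toList := by
    simp [PySem.Dict.keys_empty, PySem.Set.update_nil_left]
  rw [hkeys]
  congr 1
  apply List.map_congr_left
  intro k _
  rw [PySem.Dict.getD_foldl_insert_add_one, PySem.Dict.getD_empty, zero_add]
  exact_mod_cast PySem.Int.floordiv_natCast (s.toList.count k) 2

-- B's value equals the same sum
lemma pv_alt_eq (s : String) :
    solution_alt s = ((PySem.Set.ofList s.toList).map
      (fun k => ((s.toList.count k / 2 : Nat) : Int))).sum := by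
  unfold solution_alt
  rw [pv_fold_eq_pvH]
  rw [zero_add]
  have h1 : pvH (fun k => PySem.Set.contains PySem.Set.empty k) s.toList
      = ((PySem.Set.ofList s.toList).map (fun k => s.toList.count k / 2)).sum := by
    unfold pvH
    have hP : ∀ k, PySem.Set.contains (PySem.Set.empty : PySem.Set Char) k = false := by
      intro k; simp [PySem.Set.empty]
    have hfin : (PySem.Set.ofList s.toList).toFinset = s.toList.toFinset := by
      ext x; simp [PySem.Set.mem_ofList]
    rw [← hfin, ← List.sum_toFinset _ (PySem.Set.nodup_ofList s.toList)]
    apply Finset.sum_congr rfl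
    intro k _
    simp only [hP k]
    simp
  rw [h1, Nat.cast_list_sum, List.map_map]
  rfl

-- ===== VERDICT (by name: the statement is the Claim_ definition above) =====
theorem solution_spec : Claim_equal_solution := by
  intro s _
  unfold Spec_solution
  rw [pv_solution_eq, pv_alt_eq]
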